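-- pv_equiv track=rewrite | github.com/WayneLin552/Doudizhu_fast_card_features_extraction | fun340.py | fenlei_1
-- ===== SOURCE A (Python) =====
-- def fenlei_1(a):
--     list_3 = []
--     list_4 = []
--     list_5 = []
--     list_other = []
--     for i in a:
--         if len(i) == 6:
--             list_3.append(i)
--         elif len(i) == 8:
--             list_4.append(i)
--         elif len(i) == 10:
--             list_5.append(i)
--         else:
--             list_other.append(i)
--     return list_3,list_4,list_5,list_other
-- ===== SOURCE B (Python) =====
-- def fenlei_1(a):
--     list_3 = [i for i in a if len(i) == 6]
--     list_4 = [i for i in a if len(i) == 8]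
--     list_5 = [i for i in a if len(i) == 10]
--     list_other = [i for i in a if len(i) not in (6, 8, 10)]
--     return list_3, list_4, list_5, list_other
-- ===== Notes on version B (the rewrite author's own statement) =====
-- stated objective: idiomatic
-- what changed: Replaced the single interleaved pass with if/elif dispatch and four mutable accumulators by four independent filtering comprehensions, one per bucket.
import Mathlib
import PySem

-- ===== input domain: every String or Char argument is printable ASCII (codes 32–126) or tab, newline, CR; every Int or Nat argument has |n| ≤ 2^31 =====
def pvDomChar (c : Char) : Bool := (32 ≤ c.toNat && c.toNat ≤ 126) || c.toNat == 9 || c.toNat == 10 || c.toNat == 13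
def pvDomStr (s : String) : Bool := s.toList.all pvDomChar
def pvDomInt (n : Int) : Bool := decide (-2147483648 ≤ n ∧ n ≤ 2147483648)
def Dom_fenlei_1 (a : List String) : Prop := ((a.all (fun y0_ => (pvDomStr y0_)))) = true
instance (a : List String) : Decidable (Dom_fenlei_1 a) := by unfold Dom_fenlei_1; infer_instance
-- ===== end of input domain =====

-- B replaces A's single pass with if/elif dispatch into four accumulators by four
-- independent filtering passes (idiomatic comprehensions); return value identical.

-- ===== PORT A =====
-- one fold over a, threading the four accumulator lists, branches in A's order
def fenlei_1 (a : List String) : List String × List String × List String × List String :=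
  a.foldl
    (fun st i =>
      let (l3, l4, l5, lo) := st
      if PySem.Str.len i = 6 then (l3 ++ [i], l4, l5, lo)
      else if PySem.Str.len i = 8 then (l3, l4 ++ [i], l5, lo)
      else if PySem.Str.len i = 10 then (l3, l4, l5 ++ [i], lo)
      else (l3, l4, l5, lo ++ [i]))
    ([], [], [], [])

-- ===== PORT B =====
-- four separate filtering scans, one per bucket
def fenlei_1_alt (a : List String) : List String × List String × List String × List String :=
  (a.filter (fun i => PySem.Str.len i == 6),
   a.filter (fun i => PySem.Str.len i == 8),
   a.filter (fun i => PySem.Str.len i == 10),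
   a.filter (fun i => !(PySem.Str.len i == 6 || PySem.Str.len i == 8 || PySem.Str.len i == 10)))

-- ===== PRECONDITION & SPEC =====
def Spec_fenlei_1 (a : List String) (out : List String × List String × List String × List String) : Prop := out = fenlei_1_alt a
instance (a : List String) (out : List String × List String × List String × List String) : Decidable (Spec_fenlei_1 a out) := by unfold Spec_fenlei_1; infer_instance

-- ===== CLAIM (what is proved, stated in full; the proofs are below) =====
def Claim_equal_fenlei_1 : Prop := ∀ (a : List String), Dom_fenlei_1 a → Spec_fenlei_1 a (fenlei_1 a)

-- ===== LEMMAS AND PROOFS =====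
theorem fenlei_1_fold_inv (a : List String) (l3 l4 l5 lo : List String) :
    a.foldl
      (fun st i =>
        if PySem.Str.len i = 6 then (st.1 ++ [i], st.2.1, st.2.2.1, st.2.2.2)
        else if PySem.Str.len i = 8 then (st.1, st.2.1 ++ [i], st.2.2.1, st.2.2.2)
        else if PySem.Str.len i = 10 then (st.1, st.2.1, st.2.2.1 ++ [i], st.2.2.2)
        else (st.1, st.2.1, st.2.2.1, st.2.2.2 ++ [i]))
      (l3, l4, l5, lo)
    = (l3 ++ a.filter (fun i => PySem.Str.len i == 6),
       l4 ++ a.filter (fun i => PySem.Str.len i == 8),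
       l5 ++ a.filter (fun i => PySem.Str.len i == 10),
       lo ++ a.filter (fun i => !(PySem.Str.len i == 6 || PySem.Str.len i == 8 || PySem.Str.len i == 10))) := by
  induction a generalizing l3 l4 l5 lo with
  | nil => simp
  | cons x xs ih =>
    simp only [List.foldl_cons, List.filter_cons]
    simp only [PySem.Str.len_eq] at ih ⊢
    by_cases h6 : (x.length : Int) = 6
    · simp only [if_pos h6, ih]; simp [h6] <;> omega
    · by_cases h8 : (x.length : Int) = 8
      · simp only [if_neg h6, if_pos h8, ih]; simp [h6, h8] <;> omega
      · by_cases h10 : (x.length : Int) = 10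
        · simp only [if_neg h6, if_neg h8, if_pos h10, ih]; simp [h6, h8, h10] <;> omega
        · simp only [if_neg h6, if_neg h8, if_neg h10, ih]; simp [h6, h8, h10] <;> omega

-- ===== VERDICT (by name: the statement is the Claim_ definition above) =====
theorem fenlei_1_spec : Claim_equal_fenlei_1 := by
  intro a _
  show fenlei_1 a = fenlei_1_alt a
  unfold fenlei_1 fenlei_1_alt
  simp only [fenlei_1_fold_inv, List.nil_append]
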